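-- pv_equiv track=rewrite | github.com/prodgers1/AdventOfCode2020 | Day14/Day14.py | replaceX
-- ===== SOURCE A (Python) =====
-- def replaceX(address, currentBinaryXValue):
--   address = list(address)
--
--   indicies = [i for i, x in enumerate(address) if x == 'X']
--   j = 0
--   for index in indicies:
--     address[index] = currentBinaryXValue[j]
--     j += 1
--
--   return ''.join(address)
-- ===== SOURCE B (Python) =====
-- def replaceX(address, currentBinaryXValue):
--   out = []
--   j = 0
--   for ch in address:
--     if ch == 'X':
--       out.append(currentBinaryXValue[j])
--       j += 1
--     else:
--       out.append(ch)
--   return ''.join(out)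
-- ===== Notes on version B (the rewrite author's own statement) =====
-- stated objective: simpler
-- what changed: single forward pass appending each character (or the next substitution character, via a running counter) replaces A's separate index-collection pass followed by in-place assignments into a mutable list
import Mathlib
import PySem

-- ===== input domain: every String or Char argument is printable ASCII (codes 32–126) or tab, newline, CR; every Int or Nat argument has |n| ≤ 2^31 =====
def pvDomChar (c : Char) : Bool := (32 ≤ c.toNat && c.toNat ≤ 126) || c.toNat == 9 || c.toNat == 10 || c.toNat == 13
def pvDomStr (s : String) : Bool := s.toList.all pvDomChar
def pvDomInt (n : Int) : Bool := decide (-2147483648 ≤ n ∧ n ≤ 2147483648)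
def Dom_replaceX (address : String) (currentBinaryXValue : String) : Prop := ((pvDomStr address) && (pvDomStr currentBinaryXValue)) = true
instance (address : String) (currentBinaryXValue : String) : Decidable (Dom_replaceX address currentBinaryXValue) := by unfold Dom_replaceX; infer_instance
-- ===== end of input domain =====

-- ===== PORT A =====
-- B changes only the decomposition: one pass instead of collect-indices-then-assign; return value proved equal on Pre_ (A raises IndexError outside it, B does too).

-- the comprehension [i for i, x in enumerate(address) if x == 'X'], counter starting at i
def pyIndicesX : List Char → Nat → List Nat
  | [], _ => []
  | c :: r, i => if c = 'X' then i :: pyIndicesX r (i + 1) else pyIndicesX r (i + 1)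

-- the for-loop over indicies: address[index] = currentBinaryXValue[j]; j += 1
-- (currentBinaryXValue[j] out of range is an IndexError in Python, excluded by Pre_; here getD)
def replaceXGo (addr : List Char) (val : List Char) : List Nat → Nat → List Char
  | [], _ => addr
  | i :: rest, j => replaceXGo (addr.set i (val.getD j '?')) val rest (j + 1)

def replaceX (address : String) (currentBinaryXValue : String) : String :=
  let addr := address.toList
  let indicies := pyIndicesX addr 0
  String.mk (replaceXGo addr currentBinaryXValue.toList indicies 0)

-- ===== PORT B =====
-- the single for-loop of Source B, with accumulator for out and counter j
def replaceXAltGo (val : List Char) : List Char → Nat → List Char → List Char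
  | [], _, acc => acc.reverse
  | c :: r, j, acc =>
    if c = 'X' then replaceXAltGo val r (j + 1) (val.getD j '?' :: acc)
    else replaceXAltGo val r j (c :: acc)

def replaceX_alt (address : String) (currentBinaryXValue : String) : String :=
  String.mk (replaceXAltGo currentBinaryXValue.toList address.toList 0 [])

-- ===== PRECONDITION & SPEC =====
-- Pre_ excludes exactly the inputs where Python A raises IndexError: more 'X' characters than substitution characters.
def Pre_replaceX (address : String) (currentBinaryXValue : String) : Prop :=
  address.toList.count 'X' ≤ currentBinaryXValue.toList.length
instance (address : String) (currentBinaryXValue : String) : Decidable (Pre_replaceX address currentBinaryXValue) := by unfold Pre_replaceX; infer_instance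
def pvWitness_replaceX : String × String := ("X10X1X", "011")

def Spec_replaceX (address : String) (currentBinaryXValue : String) (out : String) : Prop := out = replaceX_alt address currentBinaryXValue
instance (address : String) (currentBinaryXValue : String) (out : String) : Decidable (Spec_replaceX address currentBinaryXValue out) := by unfold Spec_replaceX; infer_instance

-- ===== CLAIM (what is proved, stated in full; the proofs are below) =====
def Claim_equal_replaceX : Prop := ∀ (address : String) (currentBinaryXValue : String), Dom_replaceX address currentBinaryXValue → Pre_replaceX address currentBinaryXValue → Spec_replaceX address currentBinaryXValue (replaceX address currentBinaryXValue)

-- ===== LEMMAS AND PROOFS =====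

-- common reference form of the substitution
def coreX (val : List Char) : List Char → Nat → List Char
  | [], _ => []
  | c :: r, j => if c = 'X' then val.getD j '?' :: coreX val r (j + 1) else c :: coreX val r j

theorem pyIndicesX_succ (addr : List Char) : ∀ i, pyIndicesX addr (i + 1) = (pyIndicesX addr i).map (· + 1) := by
  induction addr with
  | nil => intro i; simp [pyIndicesX]
  | cons c r ih =>
    intro i
    by_cases h : c = 'X' <;> simp [pyIndicesX, h, ih]

theorem replaceXGo_cons_map (val : List Char) (c : Char) :
    ∀ (idxs : List Nat) (addr : List Char) (j : Nat),
    replaceXGo (c :: addr) val (idxs.map (· + 1)) j = c :: replaceXGo addr val idxs j := by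
  intro idxs
  induction idxs with
  | nil => intro addr j; simp [replaceXGo]
  | cons i rest ih =>
    intro addr j
    simp only [List.map, replaceXGo, List.set]
    exact ih _ _

theorem replaceXGo_eq_coreX (val : List Char) (addr : List Char) :
    ∀ j, replaceXGo addr val (pyIndicesX addr 0) j = coreX val addr j := by
  induction addr with
  | nil => intro j; simp [pyIndicesX, replaceXGo, coreX]
  | cons c r ih =>
    intro j
    by_cases h : c = 'X'
    · simp only [pyIndicesX, h, if_true, pyIndicesX_succ, replaceXGo, List.set, coreX,
        replaceXGo_cons_map]
      exact congrArg _ (ih (j + 1))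
    · simp only [pyIndicesX, h, if_false, pyIndicesX_succ, coreX, replaceXGo_cons_map]
      exact congrArg _ (ih j)

theorem replaceXAltGo_eq_coreX (val : List Char) (addr : List Char) :
    ∀ j acc, replaceXAltGo val addr j acc = acc.reverse ++ coreX val addr j := by
  induction addr with
  | nil => intro j acc; simp [replaceXAltGo, coreX]
  | cons c r ih =>
    intro j acc
    by_cases h : c = 'X' <;> simp [replaceXAltGo, coreX, h, ih]

-- ===== VERDICT (by name: the statement is the Claim_ definition above) =====
theorem replaceX_spec : Claim_equal_replaceX := by
  intro address currentBinaryXValue _ _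
  unfold Spec_replaceX replaceX replaceX_alt
  simp [replaceXGo_eq_coreX, replaceXAltGo_eq_coreX]
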